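-- pv_equiv track=rewrite | github.com/averyk22/cg_fall_2024 | hw2/q8.py | find_min_unique_k
-- ===== SOURCE A (Python) =====
-- def generate_kmers(genome, k):
--     kmers = set()
--     for i in range(len(genome) - k + 1):
--         kmers.add(genome[i:i + k])
--     return kmers
--
-- def find_min_unique_k(wuhan_genome, alpha_genome, delta_genome, omicron_genome):
--     for k in range(1, len(omicron_genome)):
--         wuhan_kmers = generate_kmers(wuhan_genome, k)
--         alpha_kmers = generate_kmers(alpha_genome, k)
--         delta_kmers = generate_kmers(delta_genome, k)
--         omicron_kmers = generate_kmers(omicron_genome, k)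
--
--         unique_kmers = omicron_kmers - (wuhan_kmers | alpha_kmers | delta_kmers)
--         if unique_kmers:
--             return k
-- ===== SOURCE B (Python) =====
-- def find_min_unique_k(wuhan_genome, alpha_genome, delta_genome, omicron_genome):
--     n = len(omicron_genome)
--
--     def has_unique(k):
--         others = set()
--         for g in (wuhan_genome, alpha_genome, delta_genome):
--             for i in range(len(g) - k + 1):
--                 others.add(g[i:i + k])
--         return any(omicron_genome[i:i + k] not in others
--                    for i in range(n - k + 1))
--
--     # The predicate is monotone in k: a unique k-mer extends (left or right)
--     # to a unique (k+1)-mer while k+1 < n, so binary search finds the minimum.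
--     if n < 2 or not has_unique(n - 1):
--         return None
--     lo, hi = 1, n - 1
--     while lo < hi:
--         mid = (lo + hi) // 2
--         if has_unique(mid):
--             hi = mid
--         else:
--             lo = mid + 1
--     return lo
-- ===== Notes on version B (the rewrite author's own statement) =====
-- stated objective: faster
-- what changed: B replaces A's linear scan over k (rebuilding all four k-mer sets for every k from 1 up to the answer) by a binary search on k, exploiting that 'omicron has a k-mer absent from the other genomes' is monotone in k; each probe builds a single set of the other genomes' k-mers and scans omicron's windows with early exit.
import Mathlib
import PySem

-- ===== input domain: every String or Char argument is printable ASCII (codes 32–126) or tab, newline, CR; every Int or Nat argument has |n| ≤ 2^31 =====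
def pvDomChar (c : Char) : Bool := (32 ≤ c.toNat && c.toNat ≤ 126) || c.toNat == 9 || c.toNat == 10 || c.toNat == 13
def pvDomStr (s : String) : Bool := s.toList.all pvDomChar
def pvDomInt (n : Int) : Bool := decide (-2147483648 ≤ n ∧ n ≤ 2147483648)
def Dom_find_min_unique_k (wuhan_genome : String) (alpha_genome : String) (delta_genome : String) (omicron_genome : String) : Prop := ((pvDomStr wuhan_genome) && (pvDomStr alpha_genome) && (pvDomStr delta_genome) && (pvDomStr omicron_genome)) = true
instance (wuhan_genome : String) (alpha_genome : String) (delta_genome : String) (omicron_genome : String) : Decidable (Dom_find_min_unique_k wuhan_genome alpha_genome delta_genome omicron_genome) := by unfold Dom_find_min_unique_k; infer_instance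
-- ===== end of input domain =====

-- B replaces A's linear scan over k by a binary search on k (the "omicron has a
-- unique k-mer" predicate is monotone in k), with a single set of the other
-- genomes' k-mers per probe and an early-exit membership scan.

-- ===== PORT A =====
def generate_kmers (genome : String) (k : Int) : PySem.Set String :=
  (PySem.List.pyRange 0 (PySem.Str.len genome - k + 1)).foldl
    (fun kmers i => PySem.Set.add kmers (PySem.Str.slice genome (some i) (some (i + k))))
    PySem.Set.empty

def pvFindLoop (w a d o : String) : List Int → Option Int
  | [] => none
  | k :: ks =>
    let wuhan_kmers := generate_kmers w k
    let alpha_kmers := generate_kmers a k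
    let delta_kmers := generate_kmers d k
    let omicron_kmers := generate_kmers o k
    let unique_kmers := PySem.Set.diff omicron_kmers
      (PySem.Set.union (PySem.Set.union wuhan_kmers alpha_kmers) delta_kmers)
    if unique_kmers ≠ [] then some k else pvFindLoop w a d o ks

def find_min_unique_k (wuhan_genome : String) (alpha_genome : String) (delta_genome : String) (omicron_genome : String) : Option Int :=
  pvFindLoop wuhan_genome alpha_genome delta_genome omicron_genome
    (PySem.List.pyRange 1 (PySem.Str.len omicron_genome))

-- ===== PORT B =====
-- others = set of all k-mers of the three non-omicron genomes
def pvOthers (w a d : String) (k : Int) : PySem.Set String :=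
  [w, a, d].foldl
    (fun others g =>
      (PySem.List.pyRange 0 (PySem.Str.len g - k + 1)).foldl
        (fun others i => PySem.Set.add others (PySem.Str.slice g (some i) (some (i + k))))
        others)
    PySem.Set.empty

-- has_unique(k): some k-mer of omicron is in none of the other genomes
def pvHasUnique (w a d o : String) (k : Int) : Bool :=
  let others := pvOthers w a d k
  (PySem.List.pyRange 0 (PySem.Str.len o - k + 1)).any
    (fun i => !(PySem.Set.contains others (PySem.Str.slice o (some i) (some (i + k)))))

-- the while lo < hi binary-search loop
def pvBSearch (w a d o : String) (lo hi : Int) : Int :=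
  if h : lo < hi then
    let mid := PySem.Int.floordiv (lo + hi) 2
    if pvHasUnique w a d o mid then pvBSearch w a d o lo mid
    else pvBSearch w a d o (mid + 1) hi
  else lo
termination_by (hi - lo).toNat
decreasing_by
  · have hlt : PySem.Int.floordiv (lo + hi) 2 < hi :=
      (PySem.Int.floordiv_lt_iff_lt_mul (by norm_num)).mpr (by omega)
    omega
  · have hb := PySem.Int.floordiv_two_mid_bounds (le_of_lt h)
    omega

def find_min_unique_k_alt (wuhan_genome : String) (alpha_genome : String) (delta_genome : String) (omicron_genome : String) : Option Int :=
  let n := PySem.Str.len omicron_genome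
  if n < 2 ∨ pvHasUnique wuhan_genome alpha_genome delta_genome omicron_genome (n - 1) = false then
    none
  else
    some (pvBSearch wuhan_genome alpha_genome delta_genome omicron_genome 1 (n - 1))

-- ===== PRECONDITION & SPEC =====
def Spec_find_min_unique_k (wuhan_genome : String) (alpha_genome : String) (delta_genome : String) (omicron_genome : String) (out : Option Int) : Prop := out = find_min_unique_k_alt wuhan_genome alpha_genome delta_genome omicron_genome
instance (wuhan_genome : String) (alpha_genome : String) (delta_genome : String) (omicron_genome : String) (out : Option Int) : Decidable (Spec_find_min_unique_k wuhan_genome alpha_genome delta_genome omicron_genome out) := by unfold Spec_find_min_unique_k; infer_instance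

-- ===== CLAIM (what is proved, stated in full; the proofs are below) =====
def Claim_equal_find_min_unique_k : Prop := ∀ (wuhan_genome : String) (alpha_genome : String) (delta_genome : String) (omicron_genome : String), Dom_find_min_unique_k wuhan_genome alpha_genome delta_genome omicron_genome → Spec_find_min_unique_k wuhan_genome alpha_genome delta_genome omicron_genome (find_min_unique_k wuhan_genome alpha_genome delta_genome omicron_genome)

-- ===== LEMMAS AND PROOFS =====

-- `u` occurs as a κ-mer of the character list g
def pvHasKmer (g : List Char) (κ : Nat) (u : List Char) : Prop :=
  ∃ j : Nat, j + κ ≤ g.length ∧ (g.drop j).take κ = u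

-- Prop-level content of both programs' per-k test, on character lists
def pvUniq (wl al dl tl : List Char) (κ : Nat) : Prop :=
  ∃ i : Nat, i + κ ≤ tl.length ∧
    ¬ pvHasKmer wl κ ((tl.drop i).take κ) ∧
    ¬ pvHasKmer al κ ((tl.drop i).take κ) ∧
    ¬ pvHasKmer dl κ ((tl.drop i).take κ)


-- toList of the slice genome[j:j+κ]
lemma pv_slice_toList (g : String) (j κ : Nat) :
    (PySem.Str.slice g (some (j:Int)) (some ((j:Int) + (κ:Int)))).toList = (g.toList.drop j).take κ := by
  simp [PySem.Str.toList_slice, PySem.Chars.slice_eq_listSlice, PySem.List.slice_natCast_add]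

-- membership in A's per-genome k-mer set
lemma pv_mem_generate_kmers (g : String) (k : Int) (hk : 0 < k) (x : String) :
    x ∈ generate_kmers g k ↔
      ∃ j : Nat, j + k.toNat ≤ g.toList.length ∧ x.toList = (g.toList.drop j).take k.toNat := by
  have hlen := PySem.Str.len_eq g
  have hkk : ((k.toNat : Int)) = k := Int.toNat_of_nonneg (le_of_lt hk)
  simp only [generate_kmers, PySem.Set.mem_foldl_add, PySem.Set.empty, List.not_mem_nil,
    false_or, PySem.List.mem_pyRange_one]
  constructor
  · rintro ⟨i, ⟨hi0, hi1⟩, rfl⟩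
    refine ⟨i.toNat, by omega, ?_⟩
    have hi : ((i.toNat : Int)) = i := Int.toNat_of_nonneg hi0
    have hs := pv_slice_toList g i.toNat k.toNat
    rw [hi, hkk] at hs
    exact hs
  · rintro ⟨j, hj, hx⟩
    refine ⟨(j : Int), ⟨by omega, by omega⟩, ?_⟩
    apply String.toList_inj.mp
    rw [← hkk, pv_slice_toList, hx]

-- membership in B's combined set of the others' k-mers
lemma pv_mem_pvOthers (w a d : String) (k : Int) (_hk : 0 < k) (x : String) :
    x ∈ pvOthers w a d k ↔
      x ∈ generate_kmers w k ∨ x ∈ generate_kmers a k ∨ x ∈ generate_kmers d k := by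
  simp only [pvOthers, generate_kmers, List.foldl_cons, List.foldl_nil,
    PySem.Set.mem_foldl_add, PySem.Set.empty, List.not_mem_nil, false_or]
  exact or_assoc

-- "x not a k-mer of g", at list level
lemma pv_notmem_iff (g : String) (k : Int) (hk : 0 < k) (x : String) :
    x ∉ generate_kmers g k ↔ ¬ pvHasKmer g.toList k.toNat x.toList := by
  rw [pv_mem_generate_kmers g k hk]
  unfold pvHasKmer
  simp only [eq_comm]

-- B's probe decides pvUniq
lemma pv_hasUnique_iff (w a d o : String) (k : Int) (hk : 0 < k) :
    pvHasUnique w a d o k = true ↔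
      pvUniq w.toList a.toList d.toList o.toList k.toNat := by
  have hlen := PySem.Str.len_eq o
  have hkk : ((k.toNat : Int)) = k := Int.toNat_of_nonneg (le_of_lt hk)
  simp only [pvHasUnique, List.any_eq_true, PySem.List.mem_pyRange_one, Bool.not_eq_eq_eq_not,
    Bool.not_true]
  have hcon : ∀ (s : PySem.Set String) (y : String),
      PySem.Set.contains s y = false ↔ y ∉ s := by
    intro s y
    rw [← Bool.not_eq_true, PySem.Set.contains_iff]
  constructor
  · rintro ⟨i, ⟨hi0, hi1⟩, hc⟩
    rw [hcon, pv_mem_pvOthers w a d k hk] at hc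
    push Not at hc
    obtain ⟨hw, ha, hd⟩ := hc
    rw [pv_notmem_iff w k hk] at hw
    rw [pv_notmem_iff a k hk] at ha
    rw [pv_notmem_iff d k hk] at hd
    have hi : ((i.toNat : Int)) = i := Int.toNat_of_nonneg hi0
    rw [← hi, ← hkk, pv_slice_toList] at hw ha hd
    exact ⟨i.toNat, by omega, hw, ha, hd⟩
  · rintro ⟨i, hi, hw, ha, hd⟩
    refine ⟨(i : Int), ⟨by omega, by omega⟩, ?_⟩
    rw [hcon, pv_mem_pvOthers w a d k hk]
    push Not
    rw [pv_notmem_iff w k hk, pv_notmem_iff a k hk, pv_notmem_iff d k hk, ← hkk, pv_slice_toList]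
    exact ⟨hw, ha, hd⟩

-- A's per-k test decides pvUniq too
lemma pv_Astep_iff (w a d o : String) (k : Int) (hk : 0 < k) :
    (PySem.Set.diff (generate_kmers o k)
      (PySem.Set.union (PySem.Set.union (generate_kmers w k) (generate_kmers a k)) (generate_kmers d k)) ≠ []) ↔
      pvUniq w.toList a.toList d.toList o.toList k.toNat := by
  have hkk : ((k.toNat : Int)) = k := Int.toNat_of_nonneg (le_of_lt hk)
  rw [ne_eq, List.eq_nil_iff_forall_not_mem]
  push Not
  constructor
  · rintro ⟨x, hx⟩
    rw [PySem.Set.mem_diff, PySem.Set.mem_union, PySem.Set.mem_union] at hx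
    obtain ⟨hom, hoth⟩ := hx
    push Not at hoth
    obtain ⟨⟨hw, ha⟩, hd⟩ := hoth
    rw [pv_notmem_iff w k hk] at hw
    rw [pv_notmem_iff a k hk] at ha
    rw [pv_notmem_iff d k hk] at hd
    rw [pv_mem_generate_kmers o k hk] at hom
    obtain ⟨i, hi, hxl⟩ := hom
    rw [hxl] at hw ha hd
    exact ⟨i, hi, hw, ha, hd⟩
  · rintro ⟨i, hi, hw, ha, hd⟩
    refine ⟨PySem.Str.slice o (some (i:Int)) (some ((i:Int) + k)), ?_⟩
    rw [PySem.Set.mem_diff, PySem.Set.mem_union, PySem.Set.mem_union]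
    have hxl : (PySem.Str.slice o (some (i:Int)) (some ((i:Int) + k))).toList
        = (o.toList.drop i).take k.toNat := by
      rw [← hkk]; exact pv_slice_toList o i k.toNat
    constructor
    · rw [pv_mem_generate_kmers o k hk]
      exact ⟨i, hi, hxl⟩
    · push Not
      rw [pv_notmem_iff w k hk, pv_notmem_iff a k hk, pv_notmem_iff d k hk, hxl]
      exact ⟨⟨hw, ha⟩, hd⟩

-- extending a window to the right keeps it unique
lemma pv_kmer_ext_right (g : List Char) (κ : Nat) (v : List Char)
    (hno : ¬ pvHasKmer g κ (v.take κ)) : ¬ pvHasKmer g (κ + 1) v := by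
  rintro ⟨j, hj, hje⟩
  refine hno ⟨j, by omega, ?_⟩
  rw [← hje, List.take_take]
  simp

-- extending a window to the left keeps it unique
lemma pv_kmer_ext_left (g : List Char) (κ : Nat) (v : List Char)
    (hno : ¬ pvHasKmer g κ (v.drop 1)) : ¬ pvHasKmer g (κ + 1) v := by
  rintro ⟨j, hj, hje⟩
  refine hno ⟨j + 1, by omega, ?_⟩
  rw [← hje, List.drop_take, List.drop_drop]
  simp

-- a unique κ-mer extends (right, or left at the end of omicron) to a unique (κ+1)-mer
lemma pv_uniq_mono (wl al dl tl : List Char) (κ : Nat) (_hκ : 1 ≤ κ) (hlen : κ + 2 ≤ tl.length)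
    (h : pvUniq wl al dl tl κ) : pvUniq wl al dl tl (κ + 1) := by
  obtain ⟨i, hiL, hw, ha, hd⟩ := h
  by_cases hr : i + κ < tl.length
  · -- extend to the right: window (tl.drop i).take (κ+1)
    have htk : ((tl.drop i).take (κ + 1)).take κ = (tl.drop i).take κ := by
      rw [List.take_take]; simp
    refine ⟨i, by omega, ?_, ?_, ?_⟩
    · exact pv_kmer_ext_right wl κ _ (htk ▸ hw)
    · exact pv_kmer_ext_right al κ _ (htk ▸ ha)
    · exact pv_kmer_ext_right dl κ _ (htk ▸ hd)
  · -- i + κ = tl.length, so i ≥ 2: extend to the left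
    have hi1 : 1 ≤ i := by omega
    have hdr : ((tl.drop (i - 1)).take (κ + 1)).drop 1 = (tl.drop i).take κ := by
      rw [List.drop_take, List.drop_drop, Nat.sub_add_cancel hi1]
      simp
    refine ⟨i - 1, by omega, ?_, ?_, ?_⟩
    · exact pv_kmer_ext_left wl κ _ (hdr ▸ hw)
    · exact pv_kmer_ext_left al κ _ (hdr ▸ ha)
    · exact pv_kmer_ext_left dl κ _ (hdr ▸ hd)

lemma pv_uniq_chain (wl al dl tl : List Char) (κ m : Nat) (hκ : 1 ≤ κ) (hm : κ ≤ m)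
    (hlen : m + 1 ≤ tl.length) (h : pvUniq wl al dl tl κ) : pvUniq wl al dl tl m := by
  induction m with
  | zero => omega
  | succ m ih =>
    rcases Nat.lt_or_ge κ (m + 1) with hlt | hge
    · exact pv_uniq_mono wl al dl tl m (by omega) (by omega) (ih (by omega) (by omega))
    · have : κ = m + 1 := by omega
      exact this ▸ h

-- false below stays false: P k → P m for k ≤ m (Bool form, via pv_uniq_chain)
lemma pv_P_chain (w a d o : String) (k m : Int) (hk : 1 ≤ k) (hkm : k ≤ m)
    (hm : m + 1 ≤ PySem.Str.len o)
    (h : pvHasUnique w a d o k = true) : pvHasUnique w a d o m = true := by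
  have hlen := PySem.Str.len_eq o
  rw [pv_hasUnique_iff w a d o k (by omega)] at h
  rw [pv_hasUnique_iff w a d o m (by omega)]
  exact pv_uniq_chain _ _ _ _ _ _ (by omega) (by omega) (by omega) h

-- A's loop is find? of B's probe
lemma pv_loop_eq_find? (w a d o : String) (ks : List Int) (hpos : ∀ k ∈ ks, 0 < k) :
    pvFindLoop w a d o ks = ks.find? (fun k => pvHasUnique w a d o k) := by
  induction ks with
  | nil => rfl
  | cons k ks ih =>
    have hk : 0 < k := hpos k (by simp)
    have hiff := (pv_Astep_iff w a d o k hk).trans (pv_hasUnique_iff w a d o k hk).symm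
    rw [pvFindLoop, List.find?_cons]
    by_cases hcond : pvHasUnique w a d o k = true
    · simp only [hcond, if_pos (hiff.mpr hcond)]
    · have : ¬ (PySem.Set.diff (generate_kmers o k)
        (PySem.Set.union (PySem.Set.union (generate_kmers w k) (generate_kmers a k)) (generate_kmers d k)) ≠ []) := by
        intro hne; exact hcond (hiff.mp hne)
      simp only [if_neg this, Bool.not_eq_true] at *
      simp only [hcond, ih (fun x hx => hpos x (by simp [hx]))]
  
-- find? over pyRange 1 n localises the least satisfying k
lemma pv_find?_pyRange_some (P : Int → Bool) (m n : Int) (h1 : 1 ≤ m) (h2 : m < n)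
    (hPm : P m = true) (hbelow : ∀ k, 1 ≤ k → k < m → P k = false) :
    (PySem.List.pyRange 1 n).find? P = some m := by
  rw [PySem.List.pyRange_one_append 1 m n h1 (by omega), List.find?_append]
  have h0 : (PySem.List.pyRange 1 m).find? P = none := by
    rw [List.find?_eq_none]
    intro x hx
    have := PySem.List.mem_pyRange_one.mp hx
    simp [hbelow x this.1 this.2]
  rw [h0, PySem.List.pyRange_one_cons h2, List.find?_cons, hPm]
  rfl

lemma pv_find?_pyRange_none (P : Int → Bool) (n : Int)
    (hall : ∀ k, 1 ≤ k → k < n → P k = false) :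
    (PySem.List.pyRange 1 n).find? P = none := by
  rw [List.find?_eq_none]
  intro x hx
  have := PySem.List.mem_pyRange_one.mp hx
  simp [hall x this.1 this.2]

-- the binary search returns the least k in [lo, hi] satisfying the probe
lemma pv_bsearch_spec (w a d o : String) :
    ∀ N : Nat, ∀ lo hi : Int, (hi - lo).toNat ≤ N → 1 ≤ lo → lo ≤ hi →
      hi ≤ PySem.Str.len o - 1 →
      pvHasUnique w a d o hi = true →
      (∀ k, 1 ≤ k → k < lo → pvHasUnique w a d o k = false) →
      lo ≤ pvBSearch w a d o lo hi ∧ pvBSearch w a d o lo hi ≤ hi ∧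
      pvHasUnique w a d o (pvBSearch w a d o lo hi) = true ∧
      (∀ k, 1 ≤ k → k < pvBSearch w a d o lo hi → pvHasUnique w a d o k = false) := by
  intro N
  induction N with
  | zero =>
    intro lo hi hN h1 hle hhi hP hbelow
    have hloeq : lo = hi := by omega
    rw [pvBSearch, dif_neg (by omega)]
    exact ⟨le_refl _, hle, hloeq ▸ hP, hbelow⟩
  | succ N ih =>
    intro lo hi hN h1 hle hhi hP hbelow
    by_cases h : lo < hi
    · rw [pvBSearch, dif_pos h]
      have hb := PySem.Int.floordiv_two_mid_bounds (le_of_lt h)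
      have hmidlt : PySem.Int.floordiv (lo + hi) 2 < hi :=
        (PySem.Int.floordiv_lt_iff_lt_mul (by norm_num)).mpr (by omega)
      set mid := PySem.Int.floordiv (lo + hi) 2 with hmid
      by_cases hPmid : pvHasUnique w a d o mid = true
      · rw [if_pos hPmid]
        exact (ih lo mid (by omega) h1 hb.1 (by omega) hPmid hbelow).imp id
          (fun h' => ⟨le_trans h'.1 (le_of_lt hmidlt), h'.2⟩)
      · rw [if_neg hPmid]
        have hbelow' : ∀ k, 1 ≤ k → k < mid + 1 → pvHasUnique w a d o k = false := by
          intro k hk1 hk2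
          by_cases hklo : k < lo
          · exact hbelow k hk1 hklo
          · by_contra htrue
            rw [Bool.not_eq_false] at htrue
            exact hPmid (pv_P_chain w a d o k mid hk1 (by omega) (by omega) htrue)
        have := ih (mid + 1) hi (by omega) (by omega) (by omega) hhi hP hbelow'
        exact ⟨le_trans (by omega) this.1, this.2⟩
    · rw [pvBSearch, dif_neg h]
      have hloeq : lo = hi := by omega
      exact ⟨le_refl _, hle, hloeq ▸ hP, hbelow⟩

-- ===== VERDICT (by name: the statement is the Claim_ definition above) =====
theorem find_min_unique_k_spec : Claim_equal_find_min_unique_k := by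
  intro w a d o _
  unfold Spec_find_min_unique_k find_min_unique_k find_min_unique_k_alt
  have hlen := PySem.Str.len_eq o
  set n := PySem.Str.len o with hn
  rw [pv_loop_eq_find? w a d o _ (fun k hk => by
    have := PySem.List.mem_pyRange_one.mp hk; omega)]
  by_cases h2 : n < 2
  · rw [if_pos (Or.inl h2)]
    exact pv_find?_pyRange_none _ n (fun k hk1 hk2 => absurd hk2 (by omega))
  · by_cases hP : pvHasUnique w a d o (n - 1) = true
    · rw [if_neg (by
        push Not
        exact ⟨by omega, fun hc => by rw [hP] at hc; cases hc⟩)]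
      have hspec := pv_bsearch_spec w a d o (n - 1 - 1).toNat 1 (n - 1) (by omega)
        (le_refl 1) (by omega) (by omega) hP (fun k hk1 hk2 => absurd hk1 (by omega))
      exact pv_find?_pyRange_some _ _ n hspec.1 (by omega) hspec.2.2.1 hspec.2.2.2
    · rw [Bool.not_eq_true] at hP
      rw [if_pos (Or.inr hP)]
      apply pv_find?_pyRange_none
      intro k hk1 hk2
      by_contra htrue
      rw [Bool.not_eq_false] at htrue
      rw [pv_P_chain w a d o k (n - 1) hk1 (by omega) (by omega) htrue] at hP
      cases hP
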